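-- pv_equiv track=rewrite | github.com/Enjef/Algo | 1500 - 1599/1578 - Minimum Time to Make Rope Colorful/1578 - Minimum Time to Make Rope Colorful.py | minCost_2nd_best_speed
-- ===== SOURCE A (Python) =====
-- from typing import List
--
-- def minCost_2nd_best_speed(colors: str, neededTime: List[int]) -> int:
--     s = 0
--     pre = colors[0]
--     min_time = 0
--     for e in range(1, len(colors)):
--         color = colors[e]
--         if pre != color:
--             if e-s >= 2:
--                 time = sum(neededTime[s:e])-max(neededTime[s:e])
--                 min_time += time
--             s = e
--             pre = color
--     time = sum(neededTime[s:len(colors)])-max(neededTime[s:len(colors)])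
--     min_time += time
--     return min_time
-- ===== SOURCE B (Python) =====
-- from typing import List
--
-- def minCost_2nd_best_speed(colors: str, neededTime: List[int]) -> int:
--     res = 0
--     maxt = neededTime[0]
--     for i in range(1, len(colors)):
--         if colors[i] == colors[i - 1]:
--             res += min(maxt, neededTime[i])
--             maxt = max(maxt, neededTime[i])
--         else:
--             maxt = neededTime[i]
--     return res
-- ===== Notes on version B (the rewrite author's own statement) =====
-- stated objective: idiomatic
-- what changed: B replaces A's group-boundary tracking with sum/max re-scans over slices by a single pass that keeps a running maximum of the current color run and adds min(running max, current time) on each repeat.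
-- outside the precondition, e.g. on minCost_2nd_best_speed('aaa', [5, 3]): A returns 3, B raises IndexError
import Mathlib
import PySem

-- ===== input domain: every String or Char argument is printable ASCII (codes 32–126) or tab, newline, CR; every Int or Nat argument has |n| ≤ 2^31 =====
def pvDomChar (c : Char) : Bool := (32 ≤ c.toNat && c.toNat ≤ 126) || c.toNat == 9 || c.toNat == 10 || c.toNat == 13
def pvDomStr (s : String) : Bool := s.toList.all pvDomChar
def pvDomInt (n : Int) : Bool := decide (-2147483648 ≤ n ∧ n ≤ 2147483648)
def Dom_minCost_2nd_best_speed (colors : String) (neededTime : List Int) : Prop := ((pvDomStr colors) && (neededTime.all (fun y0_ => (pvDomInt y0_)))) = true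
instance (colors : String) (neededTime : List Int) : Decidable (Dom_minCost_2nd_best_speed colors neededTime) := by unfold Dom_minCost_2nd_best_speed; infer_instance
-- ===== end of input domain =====

-- B is a single pass with a running maximum of the current color run (no group boundaries, no slices); equivalence is about return values only.

-- ===== PORT A =====
def minCost_2nd_best_speed (colors : String) (neededTime : List Int) : Int :=
  match PySem.Str.pyGet? colors 0 with
  | none => 0   -- Python raises IndexError here (excluded by Pre_)
  | some c0 =>
    let n : Int := PySem.Str.len colors
    let st := (PySem.List.pyRange 1 n 1).foldl
      (fun (acc : Int × Char × Int) e =>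
        match PySem.Str.pyGet? colors e with
        | none => acc   -- unreachable: 1 ≤ e < len(colors)
        | some color =>
          if acc.2.1 ≠ color then
            let mt :=
              if e - acc.1 ≥ 2 then
                acc.2.2 + ((PySem.List.slice neededTime (some acc.1) (some e)).sum
                  - ((PySem.List.max? (PySem.List.slice neededTime (some acc.1) (some e)) (fun y => y)).getD 0))
              else acc.2.2
            (e, color, mt)
          else acc)
      (0, c0, 0)
    st.2.2 + ((PySem.List.slice neededTime (some st.1) (some n)).sum
      - ((PySem.List.max? (PySem.List.slice neededTime (some st.1) (some n)) (fun y => y)).getD 0))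

-- ===== PORT B =====
def minCost_2nd_best_speed_alt (colors : String) (neededTime : List Int) : Int :=
  match PySem.List.pyGet? neededTime 0 with
  | none => 0   -- Python raises IndexError here (excluded by Pre_, and only reachable there with colors = "")
  | some m0 =>
    let n : Int := PySem.Str.len colors
    let st := (PySem.List.pyRange 1 n 1).foldl
      (fun (acc : Int × Int) i =>
        match PySem.Str.pyGet? colors i, PySem.Str.pyGet? colors (i - 1), PySem.List.pyGet? neededTime i with
        | some ci, some cim1, some ti =>
          if ci = cim1 then (acc.1 + min acc.2 ti, max acc.2 ti)
          else (acc.1, ti)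
        | _, _, _ => acc)   -- unreachable inside Pre_: all three indices are in range
      (0, m0)
    st.1

-- ===== PRECONDITION & SPEC =====
-- Pre_ keeps the problem's natural domain: colors nonempty (A raises IndexError on "") and one time per
-- balloon available (len(colors) ≤ len(neededTime)); with neededTime shorter than colors A's truncated
-- slices either raise ValueError or return accidental values of the truncation, and B raises IndexError.
def Pre_minCost_2nd_best_speed (colors : String) (neededTime : List Int) : Prop :=
  colors.toList ≠ [] ∧ colors.toList.length ≤ neededTime.length
instance (colors : String) (neededTime : List Int) : Decidable (Pre_minCost_2nd_best_speed colors neededTime) := by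
  unfold Pre_minCost_2nd_best_speed; infer_instance
def pvWitness_minCost_2nd_best_speed : String × List Int := ("abbca", [1, 2, 3, 4, 5])

def Spec_minCost_2nd_best_speed (colors : String) (neededTime : List Int) (out : Int) : Prop := out = minCost_2nd_best_speed_alt colors neededTime
instance (colors : String) (neededTime : List Int) (out : Int) : Decidable (Spec_minCost_2nd_best_speed colors neededTime out) := by unfold Spec_minCost_2nd_best_speed; infer_instance

-- ===== CLAIM (what is proved, stated in full; the proofs are below) =====
def Claim_equal_minCost_2nd_best_speed : Prop := ∀ (colors : String) (neededTime : List Int), Dom_minCost_2nd_best_speed colors neededTime → Pre_minCost_2nd_best_speed colors neededTime → Spec_minCost_2nd_best_speed colors neededTime (minCost_2nd_best_speed colors neededTime)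

-- ===== LEMMAS AND PROOFS =====
-- ===== LEMMAS AND PROOFS =====
def pvSeg (nt : List Int) (s k : Nat) : List Int := (nt.drop s).take (k - s)

def pvMax (xs : List Int) : Int := match xs with | [] => 0 | x :: t => t.foldl max x

def pvStepA (colors : String) (neededTime : List Int) (acc : Int × Char × Int) (e : Int) : Int × Char × Int :=
  match PySem.Str.pyGet? colors e with
  | none => acc
  | some color =>
    if acc.2.1 ≠ color then
      let mt :=
        if e - acc.1 ≥ 2 then
          acc.2.2 + ((PySem.List.slice neededTime (some acc.1) (some e)).sum
            - ((PySem.List.max? (PySem.List.slice neededTime (some acc.1) (some e)) (fun y => y)).getD 0))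
        else acc.2.2
      (e, color, mt)
    else acc

def pvStepB (colors : String) (neededTime : List Int) (acc : Int × Int) (i : Int) : Int × Int :=
  match PySem.Str.pyGet? colors i, PySem.Str.pyGet? colors (i - 1), PySem.List.pyGet? neededTime i with
  | some ci, some cim1, some ti =>
    if ci = cim1 then (acc.1 + min acc.2 ti, max acc.2 ti)
    else (acc.1, ti)
  | _, _, _ => acc

lemma pvSeg_length (nt : List Int) (s k : Nat) : (pvSeg nt s k).length = min (k - s) (nt.length - s) := by
  simp [pvSeg]

lemma pvSeg_ne_nil (nt : List Int) (s k : Nat) (h1 : s < k) (h2 : s < nt.length) : pvSeg nt s k ≠ [] := by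
  intro h
  have := pvSeg_length nt s k
  rw [h] at this
  simp at this
  omega

lemma pvMaxEq (xs : List Int) (h : xs ≠ []) :
    ((PySem.List.max? xs (fun y => y)).getD 0) = pvMax xs := by
  cases xs with
  | nil => exact absurd rfl h
  | cons x t => rw [PySem.List.max?_id_cons]; rfl

lemma pvSeg_succ (nt : List Int) (s k : Nat) (h1 : s ≤ k) (h2 : k < nt.length) :
    pvSeg nt s (k + 1) = pvSeg nt s k ++ [nt[k]] := by
  unfold pvSeg
  have hk : k + 1 - s = (k - s) + 1 := by omega
  rw [hk, List.take_add_one]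
  congr 1
  rw [List.getElem?_drop]
  have : s + (k - s) = k := by omega
  rw [this]
  simp [List.getElem?_eq_getElem h2]

lemma pvSeg_self (nt : List Int) (s : Nat) : pvSeg nt s s = [] := by simp [pvSeg]

lemma pvSeg_singleton (nt : List Int) (s : Nat) (h : s < nt.length) :
    pvSeg nt s (s + 1) = [nt[s]] := by
  rw [pvSeg_succ nt s s le_rfl h, pvSeg_self]
  rfl

lemma pvMax_append (xs : List Int) (a : Int) (h : xs ≠ []) :
    pvMax (xs ++ [a]) = max (pvMax xs) a := by
  cases xs with
  | nil => exact absurd rfl h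
  | cons x t => simp [pvMax, List.foldl_append]

lemma pvMax_singleton (a : Int) : pvMax [a] = a := rfl

-- the coupling invariant: B's running (res, maxt) determines A's eventual total
lemma pvCoup (colors : String) (nt : List Int)
    (hlen : colors.toList.length ≤ nt.length) :
    ∀ (m k s : Nat) (c : Char) (mt : Int),
      k + m = colors.toList.length → 1 ≤ k → s < k →
      colors.toList[s]? = some c →
      (∀ j, s ≤ j → j < k → colors.toList[j]? = some c) →
      ((PySem.List.pyRange (k : Int) (colors.toList.length : Int) 1).foldl (pvStepB colors nt)
          (mt + (pvSeg nt s k).sum - pvMax (pvSeg nt s k), pvMax (pvSeg nt s k))).1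
      =
      (let st := (PySem.List.pyRange (k : Int) (colors.toList.length : Int) 1).foldl (pvStepA colors nt)
          ((s : Int), c, mt)
       st.2.2 + ((PySem.List.slice nt (some st.1) (some (colors.toList.length : Int))).sum
         - ((PySem.List.max? (PySem.List.slice nt (some st.1) (some (colors.toList.length : Int))) (fun y => y)).getD 0))) := by
  intro m
  induction m with
  | zero =>
    intro k s c mt hkm hk1 hsk hs hrun
    have hk : k = colors.toList.length := by omega
    have hkI : ((colors.toList.length : Nat) : Int) = (k : Int) := by rw [hk]
    rw [hkI, PySem.List.pyRange_one_eq_nil le_rfl]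
    simp only [List.foldl_nil]
    have hslen : s < nt.length := by omega
    have hslice : PySem.List.slice nt (some (s : Int)) (some (k : Int)) = pvSeg nt s k := by
      rw [PySem.List.slice_natCast]; rfl
    rw [hslice, pvMaxEq _ (pvSeg_ne_nil nt s k hsk hslen)]
    show mt + (pvSeg nt s k).sum - pvMax (pvSeg nt s k)
      = mt + ((pvSeg nt s k).sum - pvMax (pvSeg nt s k))
    omega
  | succ m ih =>
    intro k s c mt hkm hk1 hsk hs hrun
    have hkn : k < colors.toList.length := by omega
    have hklen : k < nt.length := by omega
    have hslen : s < nt.length := by omega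
    have hcons : PySem.List.pyRange (k : Int) (colors.toList.length : Int) 1
        = (k : Int) :: PySem.List.pyRange ((k : Int) + 1) (colors.toList.length : Int) 1 :=
      PySem.List.pyRange_one_cons (by exact_mod_cast hkn)
    have hcast : ((k : Int) + 1) = ((k + 1 : Nat) : Int) := by push_cast; ring
    have hck : ∃ ck, colors.toList[k]? = some ck := ⟨colors.toList[k], List.getElem?_eq_getElem hkn⟩
    obtain ⟨ck, hckeq⟩ := hck
    have hgetk : PySem.Str.pyGet? colors (k : Int) = some ck := by
      rw [PySem.Str.pyGet?_natCast]; exact hckeq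
    have hgetk1 : PySem.Str.pyGet? colors ((k : Int) - 1) = some c := by
      have : ((k : Int) - 1) = ((k - 1 : Nat) : Int) := by omega
      rw [this, PySem.Str.pyGet?_natCast]
      exact hrun (k - 1) (by omega) (by omega)
    have hntk : PySem.List.pyGet? nt (k : Int) = some nt[k] := by
      rw [PySem.List.pyGet?_natCast, List.getElem?_eq_getElem hklen]
    have hsegne : pvSeg nt s k ≠ [] := pvSeg_ne_nil nt s k hsk hslen
    have hsucc : pvSeg nt s (k + 1) = pvSeg nt s k ++ [nt[k]] := pvSeg_succ nt s k (by omega) hklen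
    rw [hcons]
    simp only [List.foldl_cons]
    by_cases hcc : ck = c
    · -- same color: A's state unchanged, B accumulates
      subst hcc
      have hstepB : pvStepB colors nt
          (mt + (pvSeg nt s k).sum - pvMax (pvSeg nt s k), pvMax (pvSeg nt s k)) (k : Int)
          = (mt + (pvSeg nt s (k+1)).sum - pvMax (pvSeg nt s (k+1)), pvMax (pvSeg nt s (k+1))) := by
        simp only [pvStepB, hgetk, hgetk1, hntk]
        rw [if_pos trivial]
        rw [hsucc, pvMax_append _ _ hsegne]
        simp only [List.sum_append, List.sum_cons, List.sum_nil, Prod.mk.injEq]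
        exact ⟨by omega, trivial⟩
      have hstepA : pvStepA colors nt ((s : Int), ck, mt) (k : Int) = ((s : Int), ck, mt) := by
        simp [pvStepA, hckeq]
      rw [hstepB, hstepA, hcast]
      exact ih (k+1) s ck mt (by omega) (by omega) (by omega) hs
        (fun j hj1 hj2 => by
          by_cases hjk : j = k
          · subst hjk; exact hckeq
          · exact hrun j hj1 (by omega))
    · -- color changes: A closes the group, B resets maxt
      have hres : (if (k : Int) - (s : Int) ≥ 2 then
            mt + ((PySem.List.slice nt (some (s : Int)) (some (k : Int))).sum
              - ((PySem.List.max? (PySem.List.slice nt (some (s : Int)) (some (k : Int))) (fun y => y)).getD 0))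
          else mt) = mt + (pvSeg nt s k).sum - pvMax (pvSeg nt s k) := by
        have hslice : PySem.List.slice nt (some (s : Int)) (some (k : Int)) = pvSeg nt s k := by
          rw [PySem.List.slice_natCast]; rfl
        by_cases h2 : (k : Int) - (s : Int) ≥ 2
        · rw [if_pos h2, hslice, pvMaxEq _ hsegne]; ring
        · rw [if_neg h2]
          have hk1s : k = s + 1 := by omega
          subst hk1s
          rw [pvSeg_singleton nt s hslen]
          simp [pvMax_singleton]
      have hstepA : pvStepA colors nt ((s : Int), c, mt) (k : Int)
          = ((k : Int), ck, mt + (pvSeg nt s k).sum - pvMax (pvSeg nt s k)) := by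
        simp only [pvStepA, hgetk]
        rw [if_pos (fun h => hcc h.symm)]
        rw [hres]
      have hstepB : pvStepB colors nt
          (mt + (pvSeg nt s k).sum - pvMax (pvSeg nt s k), pvMax (pvSeg nt s k)) (k : Int)
          = (mt + (pvSeg nt s k).sum - pvMax (pvSeg nt s k), nt[k]) := by
        simp only [pvStepB, hgetk, hgetk1, hntk]
        rw [if_neg hcc]
      rw [hstepB, hstepA, hcast]
      have hinit : (mt + (pvSeg nt s k).sum - pvMax (pvSeg nt s k), nt[k])
          = ((mt + (pvSeg nt s k).sum - pvMax (pvSeg nt s k)) + (pvSeg nt k (k+1)).sum - pvMax (pvSeg nt k (k+1)), pvMax (pvSeg nt k (k+1))) := by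
        rw [pvSeg_singleton nt k hklen, pvMax_singleton]
        simp
      rw [hinit]
      exact ih (k+1) k ck (mt + (pvSeg nt s k).sum - pvMax (pvSeg nt s k)) (by omega) (by omega) (by omega) hckeq
        (fun j hj1 hj2 => by
          have : j = k := by omega
          subst this; exact hckeq)


lemma pvA_some (colors : String) (nt : List Int) (c0 : Char)
    (h : PySem.Str.pyGet? colors 0 = some c0) :
    minCost_2nd_best_speed colors nt =
      (let st := (PySem.List.pyRange 1 (PySem.Str.len colors) 1).foldl (pvStepA colors nt) (0, c0, 0)
       st.2.2 + ((PySem.List.slice nt (some st.1) (some (PySem.Str.len colors))).sum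
         - ((PySem.List.max? (PySem.List.slice nt (some st.1) (some (PySem.Str.len colors))) (fun y => y)).getD 0))) := by
  unfold minCost_2nd_best_speed
  rw [h]
  rfl

lemma pvB_some (colors : String) (nt : List Int) (m0 : Int)
    (h : PySem.List.pyGet? nt 0 = some m0) :
    minCost_2nd_best_speed_alt colors nt =
      ((PySem.List.pyRange 1 (PySem.Str.len colors) 1).foldl (pvStepB colors nt) (0, m0)).1 := by
  unfold minCost_2nd_best_speed_alt
  rw [h]
  rfl

theorem minCost_2nd_best_speed_spec : Claim_equal_minCost_2nd_best_speed := by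
  intro colors nt _ hpre
  obtain ⟨hne, hlen⟩ := hpre
  unfold Spec_minCost_2nd_best_speed
  obtain ⟨c0, rest, hcs⟩ := List.exists_cons_of_ne_nil hne
  have hn1 : 1 ≤ colors.toList.length := by rw [hcs]; simp
  have hnt0 : 0 < nt.length := by omega
  have hget0 : PySem.Str.pyGet? colors 0 = some c0 := by
    rw [show (0 : Int) = ((0 : Nat) : Int) by norm_num, PySem.Str.pyGet?_natCast, hcs]
    rfl
  have hntget0 : PySem.List.pyGet? nt 0 = some nt[0] := by
    rw [show (0 : Int) = ((0 : Nat) : Int) by norm_num, PySem.List.pyGet?_natCast,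
      List.getElem?_eq_getElem hnt0]
  rw [pvA_some colors nt c0 hget0, pvB_some colors nt nt[0] hntget0]
  have hlenE : PySem.Str.len colors = (colors.toList.length : Int) := by
    simp [PySem.Str.len_eq]
  rw [hlenE]
  have hinit : ((0 : Int), nt[0])
      = ((0 : Int) + (pvSeg nt 0 1).sum - pvMax (pvSeg nt 0 1), pvMax (pvSeg nt 0 1)) := by
    rw [pvSeg_singleton nt 0 hnt0]
    simp [pvMax_singleton]
  have hs0 : colors.toList[0]? = some c0 := by rw [hcs]; rfl
  have hcoup := pvCoup colors nt hlen (colors.toList.length - 1) 1 0 c0 0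
    (by omega) le_rfl (by omega) hs0
    (fun j hj1 hj2 => by
      have : j = 0 := by omega
      subst this; exact hs0)
  rw [hinit]
  exact hcoup.symm
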